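-- pv_equiv track=rewrite | github.com/ChanMeng666/juejin-algorithm-practice | juejin71-80/juejin75.py | solution
-- ===== SOURCE A (Python) =====
-- def solution(nodes):
--     if not nodes:
--         return 0
--
--     n = len(nodes)
--     # 记录每个节点的状态：-1表示未覆盖，0表示被覆盖，1表示放置了暖炉
--     status = [-1 if node == 1 else 0 for node in nodes]
--     heaters = 0
--
--     def warm_nodes(pos):
--         # 暖炉覆盖父节点
--         if pos > 0:
--             parent = (pos - 1) // 2
--             if status[parent] == -1:
--                 status[parent] = 0
--
--         # 暖炉覆盖当前节点
--         status[pos] = 1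
--
--         # 暖炉覆盖子节点
--         left = 2 * pos + 1
--         right = 2 * pos + 2
--         if left < n and status[left] == -1:
--             status[left] = 0
--         if right < n and status[right] == -1:
--             status[right] = 0
--
--     # 从下往上遍历节点
--     for i in range(n-1, -1, -1):
--         if nodes[i] == 1 and status[i] == -1:
--             # 如果当前节点未被覆盖，则在此放置暖炉
--             warm_nodes(i)
--             heaters += 1
--
--     return heaters
-- ===== SOURCE B (Python) =====
-- def solution(nodes):
--     # Recursive post-order DFS over the heap-array tree instead of A's
--     # bottom-up index loop with a mutable status array.
--     n = len(nodes)
--     count = 0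
--
--     def dfs(i):
--         # returns True iff a heater was placed at node i
--         nonlocal count
--         covered = False
--         for c in (2 * i + 1, 2 * i + 2):
--             if c < n and dfs(c):
--                 covered = True
--         if nodes[i] == 1 and not covered:
--             count += 1
--             return True
--         return False
--
--     if n:
--         dfs(0)
--     return count
-- ===== Notes on version B (the rewrite author's own statement) =====
-- stated objective: alternative
-- what changed: Replaced the bottom-up index loop over a mutable status array by a recursive post-order DFS over the heap-array tree that threads a 'child placed a heater' flag upward; no status array at all.
import Mathlib
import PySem

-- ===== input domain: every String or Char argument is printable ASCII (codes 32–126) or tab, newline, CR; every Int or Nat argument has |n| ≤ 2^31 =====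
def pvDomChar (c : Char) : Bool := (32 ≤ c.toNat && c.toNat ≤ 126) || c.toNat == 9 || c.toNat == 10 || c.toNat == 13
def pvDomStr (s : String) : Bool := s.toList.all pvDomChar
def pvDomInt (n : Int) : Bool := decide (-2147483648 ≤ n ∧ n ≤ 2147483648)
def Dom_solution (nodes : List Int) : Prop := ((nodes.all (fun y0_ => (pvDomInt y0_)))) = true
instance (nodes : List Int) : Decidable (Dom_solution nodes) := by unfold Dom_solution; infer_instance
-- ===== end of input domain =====

-- B replaces A's bottom-up index loop over a mutable status array by a recursive
-- post-order DFS over the heap-array tree threading a "child placed a heater" flag.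

-- ===== PORT A =====
-- warm_nodes: every index it touches is < n when called with pos < n, so getD/set are exact.
def warmNodes (n : Nat) (status : List Int) (pos : Nat) : List Int :=
  let status1 :=
    if pos > 0 then
      let parent := (pos - 1) / 2          -- pos ≥ 1, so Nat (pos-1)/2 = Python (pos-1)//2
      if status.getD parent 0 == -1 then status.set parent 0 else status
    else status
  let status2 := status1.set pos 1
  let left := 2 * pos + 1
  let right := 2 * pos + 2
  let status3 :=
    if left < n && status2.getD left 0 == -1 then status2.set left 0 else status2
  if right < n && status3.getD right 0 == -1 then status3.set right 0 else status3

-- the body of A's for-loop (state = (status, heaters), loop variable i)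
def stepA (nodes : List Int) (n : Nat) (st : List Int × Int) (i : Nat) : List Int × Int :=
  if nodes.getD i 0 == 1 && st.1.getD i 0 == -1 then (warmNodes n st.1 i, st.2 + 1) else st

-- range(n-1,-1,-1) visits exactly (List.range n).reverse (all loop indices are ≥ 0 and
-- < n, so nodes[i]/status[i] are in range and getD is exact).
def solution (nodes : List Int) : Int :=
  if nodes = [] then 0
  else
    let n := nodes.length
    let status := nodes.map (fun node => if node == 1 then (-1 : Int) else 0)
    let r := ((List.range n).reverse).foldl (stepA nodes n) (status, 0)
    r.2

-- ===== PORT B =====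
-- dfs(i): recurse into both children (when < n); node i is covered iff a child placed
-- a heater; place a heater at i iff nodes[i] == 1 and i is not covered.
-- Returns (updated count, "heater placed at i"). Index i is always < n, so getD is exact.
def dfsB (nodes : List Int) (n i : Nat) (count : Int) : Int × Bool :=
  let res1 := if _h : 2 * i + 1 < n then dfsB nodes n (2 * i + 1) count else (count, false)
  let res2 := if _h : 2 * i + 2 < n then dfsB nodes n (2 * i + 2) res1.1 else (res1.1, false)
  let covered := res1.2 || res2.2
  if nodes.getD i 0 == 1 && !covered then (res2.1 + 1, true) else (res2.1, false)
termination_by n - i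
decreasing_by all_goals omega

def solution_alt (nodes : List Int) : Int :=
  let n := nodes.length
  if n ≠ 0 then (dfsB nodes n 0 0).1 else 0

-- ===== PRECONDITION & SPEC =====
def Spec_solution (nodes : List Int) (out : Int) : Prop := out = solution_alt nodes
instance (nodes : List Int) (out : Int) : Decidable (Spec_solution nodes out) := by unfold Spec_solution; infer_instance

-- ===== CLAIM (what is proved, stated in full; the proofs are below) =====
def Claim_equal_solution : Prop := ∀ (nodes : List Int), Dom_solution nodes → Spec_solution nodes (solution nodes)

-- ===== LEMMAS AND PROOFS =====

-- pB nodes n i: "a heater gets placed at node i" (the greedy rule both programs implement).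
def pB (nodes : List Int) (n i : Nat) : Bool :=
  nodes.getD i 0 == 1 &&
    !((if _h : 2 * i + 1 < n then pB nodes n (2 * i + 1) else false) ||
      (if _h : 2 * i + 2 < n then pB nodes n (2 * i + 2) else false))
termination_by n - i
decreasing_by all_goals omega

-- covN nodes n k j: some already-processed (index ≥ k) child of j carries a heater.
def covN (nodes : List Int) (n k j : Nat) : Bool :=
  (decide (2 * j + 1 < n) && decide (k ≤ 2 * j + 1) && pB nodes n (2 * j + 1)) ||
  (decide (2 * j + 2 < n) && decide (k ≤ 2 * j + 2) && pB nodes n (2 * j + 2))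

-- the status cell of node j after A has processed all indices ≥ k
def statB (nodes : List Int) (n k j : Nat) : Int :=
  if k ≤ j then (if pB nodes n j then 1 else 0)
  else if nodes.getD j 0 == 1 && !(covN nodes n k j) then -1 else 0

def statSpec (nodes : List Int) (n k : Nat) : List Int :=
  (List.range n).map (statB nodes n k)

-- the sub-heap rooted at i, as a list of indices
def subL (n i : Nat) : List Nat :=
  i :: ((if _h : 2 * i + 1 < n then subL n (2 * i + 1) else []) ++
        (if _h : 2 * i + 2 < n then subL n (2 * i + 2) else []))
termination_by n - i
decreasing_by all_goals omega

-- anc i j: i lies on the parent chain of j (i is an ancestor-or-self of j)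
def anc (i j : Nat) : Bool := if j ≤ i then i == j else anc i ((j - 1) / 2)
termination_by j
decreasing_by omega

lemma anc_lt_false {i j : Nat} (h : j < i) : anc i j = false := by
  rw [anc]; simp [Nat.le_of_lt h]; omega

lemma anc_self (i : Nat) : anc i i = true := by rw [anc]; simp

lemma anc_le {i j : Nat} (h : anc i j = true) : i ≤ j := by
  rw [anc] at h
  by_cases hle : j ≤ i
  · simp [hle] at h; omega
  · omega

lemma anc_zero : ∀ j, anc 0 j = true := by
  intro j
  induction j using Nat.strong_induction_on with
  | _ j ih =>
    rw [anc]
    by_cases h : j ≤ 0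
    · simp [h]; omega
    · simpa [h] using ih ((j - 1) / 2) (by omega)

lemma anc_step {i : Nat} : ∀ j, i < j → anc i j = (anc (2 * i + 1) j || anc (2 * i + 2) j) := by
  intro j
  induction j using Nat.strong_induction_on with
  | _ j ih =>
    intro hij
    rw [anc]
    have hnle : ¬ j ≤ i := by omega
    simp only [hnle, if_false]
    set pj := (j - 1) / 2 with hpj
    rcases Nat.lt_trichotomy pj i with hlt | heq | hgt
    · have hj1 : j < 2 * i + 1 := by omega
      rw [anc_lt_false hlt, anc_lt_false hj1, anc_lt_false (by omega : j < 2 * i + 2)]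
      rfl
    · have hj : j = 2 * i + 1 ∨ j = 2 * i + 2 := by omega
      rw [heq, anc_self]
      rcases hj with hj | hj
      · rw [hj, anc_self]; rfl
      · rw [hj, anc_self]; simp
    · have hpjlt : pj < j := by omega
      have h1 : 2 * i + 2 < j := by omega
      rw [ih pj hpjlt hgt]
      have n1 : ¬ j ≤ 2 * i + 1 := by omega
      have n2 : ¬ j ≤ 2 * i + 2 := by omega
      have e1 : anc (2 * i + 1) j = anc (2 * i + 1) pj := by
        conv_lhs => rw [anc]
        rw [if_neg n1, ← hpj]
      have e2 : anc (2 * i + 2) j = anc (2 * i + 2) pj := by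
        conv_lhs => rw [anc]
        rw [if_neg n2, ← hpj]
      rw [e1, e2]

lemma anc_sib {i : Nat} : ∀ j, anc (2 * i + 1) j = true → anc (2 * i + 2) j = true → False := by
  intro j
  induction j using Nat.strong_induction_on with
  | _ j ih =>
    intro h1 h2
    have hle1 := anc_le h1
    have hle2 := anc_le h2
    by_cases hj : j = 2 * i + 2
    · subst hj
      rw [anc] at h1
      have hn : ¬ (2 * i + 2 ≤ 2 * i + 1) := by omega
      simp only [hn, if_false] at h1
      have he : (2 * i + 2 - 1) / 2 = i := by omega
      rw [he] at h1
      exact absurd h1 (by simp [anc_lt_false (by omega : i < 2 * i + 1)])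
    · have hgt : 2 * i + 2 < j := by omega
      rw [anc] at h1 h2
      have n1 : ¬ j ≤ 2 * i + 1 := by omega
      have n2 : ¬ j ≤ 2 * i + 2 := by omega
      simp only [n1, n2, if_false] at h1 h2
      exact ih ((j - 1) / 2) (by omega) h1 h2

lemma subL_count (n : Nat) : ∀ d i j, n - i ≤ d → i < n →
    (subL n i).count j = if anc i j && decide (j < n) then 1 else 0 := by
  intro d
  induction d with
  | zero => intro i j h hi; omega
  | succ d ih =>
    intro i j h hi
    rw [subL]
    rw [List.count_cons, List.count_append]
    have hc1 : (if _h : 2 * i + 1 < n then subL n (2 * i + 1) else []).count j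
        = if anc (2 * i + 1) j && decide (j < n) then 1 else 0 := by
      split
      · exact ih (2 * i + 1) j (by omega) (by omega)
      · rename_i hno
        rw [List.count_nil]
        by_cases hjn : j < n
        · have : anc (2 * i + 1) j = false := by
            by_contra hcon
            have := anc_le (by simpa using (Bool.not_eq_false _).mp hcon)
            omega
          simp [this]
        · simp [hjn]
    have hc2 : (if _h : 2 * i + 2 < n then subL n (2 * i + 2) else []).count j
        = if anc (2 * i + 2) j && decide (j < n) then 1 else 0 := by
      split
      · exact ih (2 * i + 2) j (by omega) (by omega)
      · rename_i hno
        rw [List.count_nil]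
        by_cases hjn : j < n
        · have : anc (2 * i + 2) j = false := by
            by_contra hcon
            have := anc_le (by simpa using (Bool.not_eq_false _).mp hcon)
            omega
          simp [this]
        · simp [hjn]
    rw [hc1, hc2]
    by_cases hjn : j < n
    · simp only [hjn, decide_true, Bool.and_true]
      rcases Nat.lt_trichotomy j i with hlt | heq | hgt
      · rw [anc_lt_false hlt, anc_lt_false (by omega : j < 2 * i + 1),
            anc_lt_false (by omega : j < 2 * i + 2)]
        simp [Nat.ne_of_gt hlt]
      · rw [heq, anc_self, anc_lt_false (by omega : i < 2 * i + 1),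
            anc_lt_false (by omega : i < 2 * i + 2)]
        simp
      · rw [anc_step j hgt]
        have hne : ¬ (i == j) = true := by simp only [beq_iff_eq]; omega
        cases h1 : anc (2 * i + 1) j <;> cases h2 : anc (2 * i + 2) j <;>
          simp [hne]
        exact absurd (anc_sib j h1 h2) (by simp)
    · have hij : (i == j) = false := by simp only [beq_eq_false_iff_ne, ne_eq]; omega
      simp [hjn, hij]

lemma count_range : ∀ n j : Nat, (List.range n).count j = if j < n then 1 else 0 := by
  intro n
  induction n with
  | zero => intro j; simp
  | succ n ih =>
    intro j
    rw [List.range_succ, List.count_append, ih]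
    by_cases h : j = n
    · subst h; simp
    · have : (List.count j [n]) = 0 := by simp [List.count_cons]; omega
      rw [this]
      by_cases h2 : j < n <;> by_cases h3 : j < n + 1 <;> simp [h2, h3] <;> omega

lemma subL_perm {n : Nat} (hn : 0 < n) : (subL n 0).Perm (List.range n) := by
  rw [List.perm_iff_count]
  intro j
  rw [subL_count n n 0 j (by omega) hn, count_range, anc_zero]
  simp

lemma dfsB_eq (nodes : List Int) (n : Nat) : ∀ d i c, n - i ≤ d →
    dfsB nodes n i c = (c + ((subL n i).countP (pB nodes n) : Int), pB nodes n i) := by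
  intro d
  induction d with
  | zero =>
    intro i c h
    have h1 : ¬ 2 * i + 1 < n := by omega
    have h2 : ¬ 2 * i + 2 < n := by omega
    have hp : pB nodes n i = (nodes.getD i 0 == 1 && !(false || false)) := by
      rw [pB]; simp only [h1, h2, dif_neg, not_false_iff]
    rw [dfsB, subL]
    simp only [h1, h2, dif_neg, not_false_iff, List.append_nil, List.countP_cons,
      List.countP_nil]
    rw [hp]
    split_ifs with hb
    · exact Prod.ext (by push_cast; ring) hb.symm
    · refine Prod.ext (by push_cast; ring) ?_
      have hb' : (nodes.getD i 0 == 1 && !(false || false)) = false := by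
        revert hb; cases (nodes.getD i 0 == 1 && !(false || false)) <;> simp
      exact hb'.symm
  | succ d ih =>
    intro i c h
    rw [dfsB, subL]
    by_cases h1 : 2 * i + 1 < n <;> by_cases h2 : 2 * i + 2 < n
    · have hp : pB nodes n i
          = (nodes.getD i 0 == 1 && !(pB nodes n (2 * i + 1) || pB nodes n (2 * i + 2))) := by
        rw [pB]; simp only [h1, h2, dif_pos]
      simp only [h1, h2, dif_pos]
      rw [ih (2 * i + 1) c (by omega), ih (2 * i + 2) _ (by omega)]
      simp only [List.countP_cons, List.countP_append]
      rw [hp]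
      split_ifs with hb
      · exact Prod.ext (by push_cast; ring) hb.symm
      · refine Prod.ext (by push_cast; ring) ?_
        have hb' : (nodes.getD i 0 == 1
            && !(pB nodes n (2 * i + 1) || pB nodes n (2 * i + 2))) = false := by
          revert hb
          cases (nodes.getD i 0 == 1 && !(pB nodes n (2 * i + 1) || pB nodes n (2 * i + 2))) <;>
            simp
        exact hb'.symm
    · have hp : pB nodes n i = (nodes.getD i 0 == 1 && !(pB nodes n (2 * i + 1) || false)) := by
        rw [pB]; simp only [h1, h2, dif_pos, dif_neg, not_false_iff]
      simp only [h1, h2, dif_pos, dif_neg, not_false_iff]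
      rw [ih (2 * i + 1) c (by omega)]
      simp only [List.countP_cons, List.append_nil]
      rw [hp]
      split_ifs with hb
      · exact Prod.ext (by push_cast; ring) hb.symm
      · refine Prod.ext (by push_cast; ring) ?_
        have hb' : (nodes.getD i 0 == 1 && !(pB nodes n (2 * i + 1) || false)) = false := by
          revert hb
          cases (nodes.getD i 0 == 1 && !(pB nodes n (2 * i + 1) || false)) <;> simp
        exact hb'.symm
    · omega
    · have h1' : ¬ 2 * i + 1 < n := h1
      have hp : pB nodes n i = (nodes.getD i 0 == 1 && !(false || false)) := by
        rw [pB]; simp only [h1, h2, dif_neg, not_false_iff]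
      simp only [h1, h2, dif_neg, not_false_iff, List.append_nil, List.countP_cons,
        List.countP_nil]
      rw [hp]
      split_ifs with hb
      · exact Prod.ext (by push_cast; ring) hb.symm
      · refine Prod.ext (by push_cast; ring) ?_
        have hb' : (nodes.getD i 0 == 1 && !(false || false)) = false := by
          revert hb; cases (nodes.getD i 0 == 1 && !(false || false)) <;> simp
        exact hb'.symm

lemma pB_eq (nodes : List Int) (n i : Nat) :
    pB nodes n i = (nodes.getD i 0 == 1 && !(covN nodes n (i + 1) i)) := by
  rw [pB]; unfold covN
  have d1 : i + 1 ≤ 2 * i + 1 := by omega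
  have d2 : i + 1 ≤ 2 * i + 2 := by omega
  by_cases h1 : 2 * i + 1 < n <;> by_cases h2 : 2 * i + 2 < n <;>
    simp [h1, h2, d1, d2]

lemma covN_succ (nodes : List Int) (n k j : Nat)
    (h : pB nodes n k = false ∨ (2 * j + 1 ≠ k ∧ 2 * j + 2 ≠ k)) :
    covN nodes n k j = covN nodes n (k + 1) j := by
  have hc : ∀ c, (c = k → pB nodes n c = false) →
      ((decide (c < n) && decide (k ≤ c) && pB nodes n c)
        = (decide (c < n) && decide (k + 1 ≤ c) && pB nodes n c)) := by
    intro c hck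
    by_cases hek : c = k
    · subst hek; simp [hck rfl]
    · have hiff : (k ≤ c) ↔ (k + 1 ≤ c) := by omega
      rw [decide_eq_decide.mpr hiff]
  unfold covN
  rcases h with hp | ⟨hne1, hne2⟩
  · rw [hc (2 * j + 1) (fun he => he ▸ hp), hc (2 * j + 2) (fun he => he ▸ hp)]
  · rw [hc (2 * j + 1) (fun he => absurd he hne1), hc (2 * j + 2) (fun he => absurd he hne2)]

lemma covN_parent (nodes : List Int) (n k : Nat) (hk0 : 0 < k) (hkn : k < n)
    (hp : pB nodes n k = true) : covN nodes n k ((k - 1) / 2) = true := by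
  unfold covN
  have hch : 2 * ((k - 1) / 2) + 1 = k ∨ 2 * ((k - 1) / 2) + 2 = k := by omega
  rcases hch with hch | hch
  · rw [hch]
    simp [hkn, hp]
  · rw [hch]
    simp [hkn, hp]

lemma statSpec_length (nodes : List Int) (n k : Nat) : (statSpec nodes n k).length = n := by
  simp [statSpec]

lemma statSpec_getElem (nodes : List Int) (n k j : Nat) (h : j < n) :
    (statSpec nodes n k)[j]'(by rw [statSpec_length]; exact h) = statB nodes n k j := by
  simp [statSpec]

lemma statSpec_getD (nodes : List Int) (n k j : Nat) (h : j < n) :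
    (statSpec nodes n k).getD j 0 = statB nodes n k j := by
  rw [List.getD_eq_getElem _ _ (by rw [statSpec_length]; exact h)]
  exact statSpec_getElem nodes n k j h

lemma statB_stable (nodes : List Int) (n k j : Nat) (h : k < j) :
    statB nodes n (k + 1) j = statB nodes n k j := by
  unfold statB
  have h1 : k + 1 ≤ j := h
  have h2 : k ≤ j := by omega
  simp [h1, h2]

lemma statB_self_true (nodes : List Int) (n k : Nat) (hp : pB nodes n k = true) :
    statB nodes n k k = 1 := by
  unfold statB; simp [hp]

lemma statB_succ_self (nodes : List Int) (n k : Nat) :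
    statB nodes n (k + 1) k = (if pB nodes n k = true then -1 else 0) := by
  unfold statB
  have h1 : ¬ (k + 1 ≤ k) := by omega
  rw [pB_eq]
  simp only [h1, if_false]

lemma statB_lt (nodes : List Int) (n k j : Nat) (h : j < k) :
    statB nodes n k j = (if nodes.getD j 0 == 1 && !(covN nodes n k j) then -1 else 0) := by
  unfold statB
  have h1 : ¬ (k ≤ j) := by omega
  simp only [h1, if_false]

lemma getD_set' (l : List Int) (i j : Nat) (a : Int) (hj : j < l.length) :
    (l.set i a).getD j 0 = if i = j then a else l.getD j 0 := by
  rw [List.getD_eq_getElem _ _ (by simpa using hj), List.getElem_set]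
  split_ifs with h
  · rfl
  · rw [List.getD_eq_getElem _ _ hj]

lemma warm_eq (nodes : List Int) (n k : Nat) (hk : k < n) (hp : pB nodes n k = true) :
    warmNodes n (statSpec nodes n (k + 1)) k = statSpec nodes n k := by
  have hlen : (statSpec nodes n (k + 1)).length = n := statSpec_length nodes n (k + 1)
  have hsget : ∀ j, j < n → (statSpec nodes n (k + 1)).getD j 0 = statB nodes n (k + 1) j :=
    fun j hj => statSpec_getD nodes n (k + 1) j hj
  set s := statSpec nodes n (k + 1) with hs
  simp only [warmNodes]
  set s1 := (if k > 0 then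
      (if s.getD ((k - 1) / 2) 0 == -1 then s.set ((k - 1) / 2) 0 else s) else s) with hs1
  have hlen1 : s1.length = n := by
    rw [hs1]; split_ifs <;> simp [hlen]
  have hget1 : ∀ j, j < n →
      s1.getD j 0 = (if k ≠ 0 ∧ j = (k - 1) / 2 then 0 else statB nodes n (k + 1) j) := by
    intro j hj
    rw [hs1]
    by_cases hk0 : k > 0
    · rw [if_pos hk0]
      by_cases hm : (s.getD ((k - 1) / 2) 0 == -1) = true
      · rw [if_pos hm, getD_set' s _ j 0 (by rw [hlen]; exact hj)]
        split_ifs with h1 h2 h3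
        · rfl
        · exact absurd ⟨by omega, h1.symm⟩ h2
        · exact absurd h3.2.symm h1
        · exact hsget j hj
      · rw [if_neg hm]
        by_cases hjp : j = (k - 1) / 2
        · rw [if_pos ⟨by omega, hjp⟩, hjp]
          rw [hsget _ (by omega : (k - 1) / 2 < n)]
          rw [hsget _ (by omega : (k - 1) / 2 < n)] at hm
          rw [statB_lt nodes n (k + 1) _ (by omega : (k - 1) / 2 < k + 1)] at hm ⊢
          split_ifs at hm ⊢ with hc
          · exact absurd (by decide : ((-1 : Int) == -1) = true) hm
          · rfl
        · rw [if_neg (fun hcon => hjp hcon.2)]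
          exact hsget j hj
    · rw [if_neg hk0]
      rw [if_neg (fun hcon : k ≠ 0 ∧ j = (k - 1) / 2 => hcon.1 (by omega))]
      exact hsget j hj
  have hget2 : ∀ j, j < n → ((s1.set k 1).getD j 0)
      = (if k = j then 1 else if k ≠ 0 ∧ j = (k - 1) / 2 then 0
          else statB nodes n (k + 1) j) := by
    intro j hj
    rw [getD_set' s1 k j 1 (by rw [hlen1]; exact hj)]
    by_cases hkj : k = j
    · rw [if_pos hkj, if_pos hkj]
    · rw [if_neg hkj, if_neg hkj, hget1 j hj]
  have hchild : ∀ c, k < c → c < n → ((s1.set k 1).getD c 0 == -1) = false := by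
    intro c hc1 hc2
    rw [hget2 c hc2]
    have e1 : ¬ (k = c) := by omega
    have e2 : ¬ (k ≠ 0 ∧ c = (k - 1) / 2) := by
      rintro ⟨hk0, hcp⟩; omega
    rw [if_neg e1, if_neg e2]
    simp only [statB]
    rw [if_pos (show k + 1 ≤ c from hc1)]
    split_ifs <;> decide
  have hcondL : (decide (2 * k + 1 < n) && ((s1.set k 1).getD (2 * k + 1) 0 == -1)) = false := by
    by_cases hc : 2 * k + 1 < n
    · rw [hchild _ (by omega) hc, Bool.and_false]
    · simp [hc]
  have hcondR : (decide (2 * k + 2 < n) && ((s1.set k 1).getD (2 * k + 2) 0 == -1)) = false := by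
    by_cases hc : 2 * k + 2 < n
    · rw [hchild _ (by omega) hc, Bool.and_false]
    · simp [hc]
  rw [hcondL]
  simp only [Bool.false_eq_true, if_false]
  rw [hcondR]
  simp only [Bool.false_eq_true, if_false]
  apply List.ext_getElem
  · rw [List.length_set, hlen1, statSpec_length]
  intro j hj1 hj2
  have hjn : j < n := by rw [List.length_set, hlen1] at hj1; exact hj1
  rw [← List.getD_eq_getElem _ 0 hj1, ← List.getD_eq_getElem _ 0 hj2]
  rw [hget2 j hjn, statSpec_getD nodes n k j hjn]
  by_cases hkj : k = j
  · rw [if_pos hkj, ← hkj, statB_self_true nodes n k hp]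
  · rw [if_neg hkj]
    by_cases hpar : k ≠ 0 ∧ j = (k - 1) / 2
    · rw [if_pos hpar]
      obtain ⟨hk0, hjp⟩ := hpar
      have hjk : j < k := by omega
      rw [statB_lt nodes n k j hjk, hjp, covN_parent nodes n k (by omega) hk hp]
      simp
    · rw [if_neg hpar]
      rcases Nat.lt_trichotomy j k with hlt | heq | hgt
      · have hk0 : k ≠ 0 := by omega
        have hjp : j ≠ (k - 1) / 2 := fun hcon => hpar ⟨hk0, hcon⟩
        rw [statB_lt nodes n (k + 1) j (by omega), statB_lt nodes n k j hlt]
        rw [covN_succ nodes n k j (Or.inr ⟨by omega, by omega⟩)]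
      · exact absurd heq.symm hkj
      · exact statB_stable nodes n k j hgt

lemma statSpec_succ_not (nodes : List Int) (n k : Nat) (hk : k < n)
    (hp : pB nodes n k = false) : statSpec nodes n (k + 1) = statSpec nodes n k := by
  apply List.ext_getElem
  · rw [statSpec_length, statSpec_length]
  intro j hj1 hj2
  have hjn : j < n := by rw [statSpec_length] at hj1; exact hj1
  rw [← List.getD_eq_getElem _ 0 hj1, ← List.getD_eq_getElem _ 0 hj2]
  rw [statSpec_getD nodes n (k + 1) j hjn, statSpec_getD nodes n k j hjn]
  rcases Nat.lt_trichotomy j k with hlt | heq | hgt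
  · rw [statB_lt nodes n (k + 1) j (by omega), statB_lt nodes n k j hlt,
      covN_succ nodes n k j (Or.inl hp)]
  · subst heq
    have e1 : statB nodes n (j + 1) j = 0 := by
      rw [statB_succ_self, hp]; simp
    have e2 : statB nodes n j j = 0 := by
      simp only [statB, le_refl, if_pos, hp]
      simp
    rw [e1, e2]
  · exact statB_stable nodes n k j hgt

lemma statSpec_init (nodes : List Int) :
    statSpec nodes nodes.length nodes.length
      = nodes.map (fun node => if node == 1 then (-1 : Int) else 0) := by
  apply List.ext_getElem
  · rw [statSpec_length, List.length_map]
  intro j hj1 hj2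
  have hjn : j < nodes.length := by simpa using hj2
  simp only [statSpec, List.getElem_map, List.getElem_range]
  rw [statB_lt nodes nodes.length nodes.length j hjn]
  have hcov : covN nodes nodes.length nodes.length j = false := by
    unfold covN
    have e1 : (decide (2 * j + 1 < nodes.length) && decide (nodes.length ≤ 2 * j + 1)) = false := by
      by_cases c : 2 * j + 1 < nodes.length
      · simp only [c, decide_true, Bool.true_and]
        simp only [decide_eq_false_iff_not]; omega
      · simp [c]
    have e2 : (decide (2 * j + 2 < nodes.length) && decide (nodes.length ≤ 2 * j + 2)) = false := by
      by_cases c : 2 * j + 2 < nodes.length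
      · simp only [c, decide_true, Bool.true_and]
        simp only [decide_eq_false_iff_not]; omega
      · simp [c]
    rw [e1, e2]
    simp
  rw [hcov]
  have hg : nodes.getD j 0 = nodes[j] := List.getD_eq_getElem _ _ hjn
  rw [hg]
  simp

lemma loopA (nodes : List Int) (n : Nat) : ∀ d k, n - k ≤ d → k ≤ n →
    (List.range' k (n - k)).foldr (fun x y => stepA nodes n y x) (statSpec nodes n n, 0)
      = (statSpec nodes n k, ((List.countP (pB nodes n) (List.range' k (n - k)) : Nat) : Int)) := by
  intro d
  induction d with
  | zero =>
    intro k h hk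
    have he : k = n := by omega
    subst he
    simp
  | succ d ih =>
    intro k h hk
    by_cases hkn : k = n
    · subst hkn; simp
    · have hk' : k < n := by omega
      have hnk : n - k = (n - (k + 1)) + 1 := by omega
      rw [hnk, List.range'_succ, List.foldr_cons, ih (k + 1) (by omega) (by omega)]
      simp only [stepA]
      rw [statSpec_getD nodes n (k + 1) k hk']
      have hcond : (nodes.getD k 0 == 1 && (statB nodes n (k + 1) k == -1)) = pB nodes n k := by
        rw [statB_succ_self]
        cases hpb : pB nodes n k
        · have hv : ((if false = true then (-1 : Int) else 0) == -1) = false := by decide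
          rw [hv, Bool.and_false]
        · have h1 : (nodes.getD k 0 == 1) = true := by
            rw [pB_eq] at hpb; exact (Bool.and_eq_true _ _ |>.mp hpb).1
          rw [if_pos rfl, h1]
          decide
      rw [hcond]
      split_ifs with hpc
      · refine Prod.ext (warm_eq nodes n k hk' hpc) ?_
        show (↑(List.countP (pB nodes n) (List.range' (k + 1) (n - (k + 1)))) : Int) + 1
            = ↑(List.countP (pB nodes n) (k :: List.range' (k + 1) (n - (k + 1))))
        rw [List.countP_cons, hpc, if_pos rfl]
        push_cast; ring
      · have hpc' : pB nodes n k = false := by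
          revert hpc; cases pB nodes n k <;> simp
        refine Prod.ext (statSpec_succ_not nodes n k hk' hpc') ?_
        show (↑(List.countP (pB nodes n) (List.range' (k + 1) (n - (k + 1)))) : Int)
            = ↑(List.countP (pB nodes n) (k :: List.range' (k + 1) (n - (k + 1))))
        rw [List.countP_cons, hpc', if_neg (by simp : ¬ (false = true))]
        push_cast; ring

lemma sol_eq (nodes : List Int) : solution nodes = solution_alt nodes := by
  by_cases hnil : nodes = []
  · subst hnil; simp [solution, solution_alt]
  · have hn : 0 < nodes.length := List.length_pos_of_ne_nil hnil
    rw [solution, if_neg hnil]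
    show ((List.range nodes.length).reverse.foldl (stepA nodes nodes.length)
        (nodes.map (fun node => if node == 1 then (-1 : Int) else 0), 0)).2
      = solution_alt nodes
    rw [List.foldl_reverse, ← statSpec_init nodes]
    have hl := loopA nodes nodes.length nodes.length 0 (by omega) (by omega)
    rw [Nat.sub_zero, ← List.range_eq_range'] at hl
    rw [hl]
    show ((List.countP (pB nodes nodes.length) (List.range nodes.length) : Nat) : Int)
      = solution_alt nodes
    rw [solution_alt]
    show _ = if nodes.length ≠ 0 then (dfsB nodes nodes.length 0 0).1 else 0
    rw [if_pos (by omega : nodes.length ≠ 0)]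
    rw [dfsB_eq nodes nodes.length nodes.length 0 0 (by omega)]
    show _ = 0 + ((List.countP (pB nodes nodes.length) (subL nodes.length 0) : Nat) : Int)
    rw [(subL_perm hn).countP_eq (pB nodes nodes.length), List.range_eq_range', zero_add]

theorem solution_spec : Claim_equal_solution := by
  intro nodes _hdom
  unfold Spec_solution
  exact sol_eq nodes
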